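-- pv_equiv track=rewrite | github.com/nctu16028/picoCTF | Cryptography/dachshund_attacks/continued_fractions.py | rational_to_contfrac
-- ===== SOURCE A (Python) =====
-- def rational_to_contfrac(x, y, max_n=1000):
--     # Converts a rational x/y fraction into a list of partial quotients [a0, ..., an]
--     a = x // y
--     pquotients = [a]
--     while a * y != x and max_n > 0:
--         max_n -= 1
--         x, y = y, x - a * y
--         a = x // y
--         pquotients.append(a)
--     return pquotients
-- ===== SOURCE B (Python) =====
-- def rational_to_contfrac(x, y, max_n=1000):
--     # Recursive form mirroring the mathematical definition of continued fractions.
--     a = x // y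
--     if a * y == x or max_n <= 0:
--         return [a]
--     return [a] + rational_to_contfrac(y, x - a * y, max_n - 1)
-- ===== Notes on version B (the rewrite author's own statement) =====
-- stated objective: idiomatic
-- what changed: Iterative while-loop with an accumulator list replaced by a direct recursion mirroring the mathematical definition of continued fractions (base case on zero remainder or exhausted max_n, recursive call on (y, x - a*y, max_n - 1)).
import Mathlib
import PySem

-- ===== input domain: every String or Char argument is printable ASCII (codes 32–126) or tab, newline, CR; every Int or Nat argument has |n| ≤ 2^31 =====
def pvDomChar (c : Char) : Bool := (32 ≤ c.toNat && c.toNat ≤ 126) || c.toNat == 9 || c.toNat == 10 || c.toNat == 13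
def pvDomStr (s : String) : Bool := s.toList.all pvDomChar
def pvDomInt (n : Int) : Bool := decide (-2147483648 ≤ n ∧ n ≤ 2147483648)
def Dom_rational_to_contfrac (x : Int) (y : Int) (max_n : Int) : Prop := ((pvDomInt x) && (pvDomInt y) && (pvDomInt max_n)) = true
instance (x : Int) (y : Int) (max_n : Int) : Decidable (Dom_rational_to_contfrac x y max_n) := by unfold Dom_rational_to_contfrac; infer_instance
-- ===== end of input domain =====

-- B replaces A's while-loop with accumulator by a direct recursion mirroring the
-- mathematical continued-fraction definition (objective: idiomatic; same cost).

-- ===== PORT A =====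
-- A's while loop: state (x, y, a, max_n, pquotients); guard a*y ≠ x ∧ max_n > 0.
def rtc_loop (x y a max_n : Int) (acc : List Int) : List Int :=
  if _h : a * y ≠ x ∧ 0 < max_n then
    let x' := y
    let y' := x - a * y
    let a' := PySem.Int.floordiv x' y'
    rtc_loop x' y' a' (max_n - 1) (acc ++ [a'])
  else acc
termination_by max_n.toNat
decreasing_by omega

def rational_to_contfrac (x : Int) (y : Int) (max_n : Int) : List Int :=
  let a := PySem.Int.floordiv x y
  rtc_loop x y a max_n [a]

-- ===== PORT B =====
def rational_to_contfrac_alt (x : Int) (y : Int) (max_n : Int) : List Int :=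
  let a := PySem.Int.floordiv x y
  if a * y = x ∨ max_n ≤ 0 then [a]
  else a :: rational_to_contfrac_alt y (x - a * y) (max_n - 1)
termination_by max_n.toNat
decreasing_by omega

-- ===== PRECONDITION & SPEC =====
-- Pre_ excludes y = 0, where Python A (and B) raise ZeroDivisionError on x // y.
def Pre_rational_to_contfrac (_x : Int) (y : Int) (_max_n : Int) : Prop := y ≠ 0
instance (x : Int) (y : Int) (max_n : Int) : Decidable (Pre_rational_to_contfrac x y max_n) := by unfold Pre_rational_to_contfrac; infer_instance
def pvWitness_rational_to_contfrac : Int × Int × Int := (17, 7, 1000)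

def Spec_rational_to_contfrac (x : Int) (y : Int) (max_n : Int) (out : List Int) : Prop := out = rational_to_contfrac_alt x y max_n
instance (x : Int) (y : Int) (max_n : Int) (out : List Int) : Decidable (Spec_rational_to_contfrac x y max_n out) := by unfold Spec_rational_to_contfrac; infer_instance

-- ===== CLAIM (what is proved, stated in full; the proofs are below) =====
def Claim_equal_rational_to_contfrac : Prop := ∀ (x : Int) (y : Int) (max_n : Int), Dom_rational_to_contfrac x y max_n → Pre_rational_to_contfrac x y max_n → Spec_rational_to_contfrac x y max_n (rational_to_contfrac x y max_n)

-- ===== LEMMAS AND PROOFS =====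

lemma alt_unfold (x y max_n : Int) :
    rational_to_contfrac_alt x y max_n =
      (let a := PySem.Int.floordiv x y;
       if a * y = x ∨ max_n ≤ 0 then [a]
       else a :: rational_to_contfrac_alt y (x - a * y) (max_n - 1)) := by
  rw [rational_to_contfrac_alt]

-- Loop invariant: starting the loop with a = x // y appends exactly the tail of B's result.
lemma rtc_loop_eq (n : Nat) : ∀ (x y max_n : Int) (acc : List Int),
    max_n.toNat = n →
    rtc_loop x y (PySem.Int.floordiv x y) max_n acc
      = acc ++ (rational_to_contfrac_alt x y max_n).tail := by
  induction n with
  | zero =>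
    intro x y max_n acc hn
    rw [rtc_loop, alt_unfold]
    have : max_n ≤ 0 := by omega
    simp [this, not_lt.mpr this]
  | succ k ih =>
    intro x y max_n acc hn
    rw [rtc_loop, alt_unfold]
    by_cases hg : PySem.Int.floordiv x y * y = x
    · simp [hg]
    · have hpos : 0 < max_n := by omega
      have hn' : (max_n - 1).toNat = k := by omega
      simp only [ne_eq, hg, not_false_iff, hpos, and_self, dite_true, false_or,
        not_le.mpr hpos]
      rw [ih y (x - PySem.Int.floordiv x y * y) (max_n - 1) _ hn',
        alt_unfold y (x - PySem.Int.floordiv x y * y) (max_n - 1)]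
      by_cases h2 : PySem.Int.floordiv y (x - PySem.Int.floordiv x y * y) * (x - PySem.Int.floordiv x y * y) = y
      · simp [h2]
      · by_cases h3 : max_n - 1 ≤ 0 <;> simp [h2, h3]

-- ===== VERDICT (by name: the statement is the Claim_ definition above) =====
theorem rational_to_contfrac_spec : Claim_equal_rational_to_contfrac := by
  intro x y max_n _ _
  unfold Spec_rational_to_contfrac rational_to_contfrac
  rw [rtc_loop_eq max_n.toNat x y max_n _ rfl, alt_unfold]
  by_cases h : PySem.Int.floordiv x y * y = x ∨ max_n ≤ 0 <;> simp [h]
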